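-- pv_equiv track=rewrite | github.com/ShahanurSharif/SecuritySoftware | backend/attendance/views.py | _is_good_branch
-- ===== SOURCE A (Python) =====
-- _NOISE_WORDS = frozenset({
--     'the', 'and', 'for', 'you', 'are', 'not', 'has', 'was', 'hrs',
--     'exit', 'full', 'screen', 'press', 'hold', 'esc', 'psm', 'nmi',
--     'rostered', 'anyone', 'found', 'breaks', 'before', 'after',
--     'please', 'select', 'your', 'shift', 'details', 'below',
--     'department', 'security', 'contractor', 'friday', 'saturday',
--     'sunday', 'monday', 'tuesday', 'wednesday', 'thursday',
--     'start', 'work', 'location', 'excessive', 'subject',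
--     'disciplinary', 'action', 'additional', 'minutes', 'hours',
--     'awarded', 'worked', 'commencing', 'responsible', 'working',
--     'notify', 'contacted', 'emergency', 'managers', 'unless',
--     'information', 'message', 'call', 'limit', 'messages',
--     'clock', 'clocked', 'clockeg', 'clockeqd', 'clocking',
--     'ciocked', 'eiocked',
-- })
--
-- def _is_good_branch(candidate: str) -> bool:
--     """Return True if *candidate* looks like a plausible branch name."""
--     if not candidate or len(candidate) < 4:
--         return False
--     words = candidate.split()
--     # Branch names: 1-2 words, each ≥ 3 letters, no noise
--     if len(words) > 2:
--         return False
--     for w in words: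
--         if len(w) < 3:
--             return False
--         if w.lower() in _NOISE_WORDS:
--             return False
--     # Reject words with implausible letter patterns — real place names
--     # rarely have 4+ consecutive consonants or 3+ consecutive vowels
--     text = candidate.replace(' ', '').upper()
--     vowels = set('AEIOU')
--     max_cons = max_vow = cur_cons = cur_vow = 0
--     for ch in text:
--         if ch in vowels:
--             cur_vow += 1; cur_cons = 0
--         else:
--             cur_cons += 1; cur_vow = 0
--         max_cons = max(max_cons, cur_cons)
--         max_vow = max(max_vow, cur_vow)
--     if max_cons > 4 or max_vow > 2:
--         return False
--     return True
-- ===== SOURCE B (Python) =====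
-- _NOISE_WORDS = frozenset({
--     'the', 'and', 'for', 'you', 'are', 'not', 'has', 'was', 'hrs',
--     'exit', 'full', 'screen', 'press', 'hold', 'esc', 'psm', 'nmi',
--     'rostered', 'anyone', 'found', 'breaks', 'before', 'after',
--     'please', 'select', 'your', 'shift', 'details', 'below',
--     'department', 'security', 'contractor', 'friday', 'saturday',
--     'sunday', 'monday', 'tuesday', 'wednesday', 'thursday',
--     'start', 'work', 'location', 'excessive', 'subject',
--     'disciplinary', 'action', 'additional', 'minutes', 'hours',
--     'awarded', 'worked', 'commencing', 'responsible', 'working',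
--     'notify', 'contacted', 'emergency', 'managers', 'unless',
--     'information', 'message', 'call', 'limit', 'messages',
--     'clock', 'clocked', 'clockeg', 'clockeqd', 'clocking',
--     'ciocked', 'eiocked',
-- })
--
--
-- def _is_good_branch(candidate: str) -> bool:
--     """Return True if *candidate* looks like a plausible branch name."""
--     if not candidate or len(candidate) < 4:
--         return False
--     words = candidate.split()
--     if len(words) > 2:
--         return False
--     if any(len(w) < 3 or w.lower() in _NOISE_WORDS for w in words):
--         return False
--     # Sliding windows instead of incremental run counters: a run of more
--     # than 4 consonants exists iff some 5-char window is all consonants,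
--     # and a run of more than 2 vowels iff some 3-char window is all vowels.
--     text = candidate.replace(' ', '').upper()
--     vowels = set('AEIOU')
--     if any(all(c not in vowels for c in text[i:i + 5])
--            for i in range(len(text) - 4)):
--         return False
--     if any(all(c in vowels for c in text[i:i + 3])
--            for i in range(len(text) - 2)):
--         return False
--     return True
-- ===== Notes on version B (the rewrite author's own statement) =====
-- stated objective: alternative
-- what changed: The incremental max-run counter loop (cur/max for consonants and vowels) is replaced by a sliding-window test: reject iff some 5-char window is all consonants or some 3-char window is all vowels; the per-word guard loop becomes an any() comprehension.
import Mathlib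
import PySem

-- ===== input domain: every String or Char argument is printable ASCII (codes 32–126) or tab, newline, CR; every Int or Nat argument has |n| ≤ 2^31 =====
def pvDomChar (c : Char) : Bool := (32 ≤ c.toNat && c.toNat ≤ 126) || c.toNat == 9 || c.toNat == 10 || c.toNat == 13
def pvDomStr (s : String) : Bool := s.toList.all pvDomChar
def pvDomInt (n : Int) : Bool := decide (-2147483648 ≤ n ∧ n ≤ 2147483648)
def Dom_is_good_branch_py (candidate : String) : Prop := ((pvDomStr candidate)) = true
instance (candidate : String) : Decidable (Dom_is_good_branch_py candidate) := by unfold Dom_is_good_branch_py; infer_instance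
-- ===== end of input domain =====

-- B replaces A's incremental max-run counter loop by a sliding-window check (alternative decomposition, same behaviour).

-- shared module-level constants: the noise-word set and the vowel test
def pvNoise : List String :=
  ["the", "and", "for", "you", "are", "not", "has", "was", "hrs",
   "exit", "full", "screen", "press", "hold", "esc", "psm", "nmi",
   "rostered", "anyone", "found", "breaks", "before", "after",
   "please", "select", "your", "shift", "details", "below",
   "department", "security", "contractor", "friday", "saturday",
   "sunday", "monday", "tuesday", "wednesday", "thursday",
   "start", "work", "location", "excessive", "subject",
   "disciplinary", "action", "additional", "minutes", "hours",
   "awarded", "worked", "commencing", "responsible", "working",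
   "notify", "contacted", "emergency", "managers", "unless",
   "information", "message", "call", "limit", "messages",
   "clock", "clocked", "clockeg", "clockeqd", "clocking",
   "ciocked", "eiocked"]

def pvVowel (c : Char) : Bool := c ∈ ['A', 'E', 'I', 'O', 'U']

-- ===== PORT A =====
-- the 'for w in words' loop with its early 'return False's
def pvCheckWordsA : List String → Bool
  | [] => true
  | w :: ws =>
    if PySem.Str.len w < 3 then false
    else if pvNoise.contains (PySem.Str.lower w) then false
    else pvCheckWordsA ws

-- one iteration of A's counter loop; state (max_cons, max_vow, cur_cons, cur_vow)
def pvStepA (s : Nat × Nat × Nat × Nat) (ch : Char) : Nat × Nat × Nat × Nat :=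
  let (mc, mv, cc, cv) := s
  if pvVowel ch then (max mc 0, max mv (cv + 1), 0, cv + 1)
  else (max mc (cc + 1), max mv 0, cc + 1, 0)

def is_good_branch_py (candidate : String) : Bool :=
  if candidate == "" || PySem.Str.len candidate < 4 then false
  else
    let words := PySem.Str.split₀ candidate
    if words.length > 2 then false
    else if !pvCheckWordsA words then false
    else
      let text := (PySem.Str.upper (PySem.Str.replace candidate " " "")).toList
      let st := text.foldl pvStepA (0, 0, 0, 0)
      if st.1 > 4 ∨ st.2.1 > 2 then false else true

-- ===== PORT B =====
def is_good_branch_py_alt (candidate : String) : Bool :=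
  if candidate == "" || PySem.Str.len candidate < 4 then false
  else
    let words := PySem.Str.split₀ candidate
    if words.length > 2 then false
    else if words.any (fun w =>
        decide (PySem.Str.len w < 3) || pvNoise.contains (PySem.Str.lower w)) then false
    else
      let text := (PySem.Str.upper (PySem.Str.replace candidate " " "")).toList
      if (PySem.List.pyRange 0 (PySem.List.len text - 4) 1).any (fun i =>
          (PySem.List.slice text (some i) (some (i + 5))).all (fun c => !pvVowel c)) then false
      else if (PySem.List.pyRange 0 (PySem.List.len text - 2) 1).any (fun i =>
          (PySem.List.slice text (some i) (some (i + 3))).all pvVowel) then false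
      else true

-- ===== PRECONDITION & SPEC =====
def Spec_is_good_branch_py (candidate : String) (out : Bool) : Prop := out = is_good_branch_py_alt candidate
instance (candidate : String) (out : Bool) : Decidable (Spec_is_good_branch_py candidate out) := by unfold Spec_is_good_branch_py; infer_instance

-- ===== CLAIM (what is proved, stated in full; the proofs are below) =====
def Claim_equal_is_good_branch_py : Prop := ∀ (candidate : String), Dom_is_good_branch_py candidate → Spec_is_good_branch_py candidate (is_good_branch_py candidate)

-- ===== LEMMAS AND PROOFS =====

theorem pvCheckWordsA_eq (ws : List String) :
    pvCheckWordsA ws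
      = !(ws.any (fun w =>
          decide (PySem.Str.len w < 3) || pvNoise.contains (PySem.Str.lower w))) := by
  induction ws with
  | nil => rfl
  | cons w ws ih =>
    simp only [pvCheckWordsA, List.any_cons, Bool.not_or]
    split_ifs with h1 h2 <;> simp_all

-- one-predicate run fold: state (max run so far, current trailing run)
def pvStep1 (p : Char → Bool) (s : Nat × Nat) (c : Char) : Nat × Nat :=
  if p c then (max s.1 (s.2 + 1), s.2 + 1) else (s.1, 0)

def pvFold1 (p : Char → Bool) (cs : List Char) : Nat × Nat :=
  cs.foldl (pvStep1 p) (0, 0)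

theorem pvStepA_split (cs : List Char) (mc mv cc cv : Nat) :
    cs.foldl pvStepA (mc, mv, cc, cv)
      = ((cs.foldl (pvStep1 (fun c => !pvVowel c)) (mc, cc)).1,
         (cs.foldl (pvStep1 pvVowel) (mv, cv)).1,
         (cs.foldl (pvStep1 (fun c => !pvVowel c)) (mc, cc)).2,
         (cs.foldl (pvStep1 pvVowel) (mv, cv)).2) := by
  induction cs generalizing mc mv cc cv with
  | nil => rfl
  | cons c cs ih =>
    simp only [List.foldl_cons, pvStepA, pvStep1]
    by_cases h : pvVowel c <;> simp [h, ih]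

theorem pvFold1_append (p : Char → Bool) (cs : List Char) (c : Char) :
    pvFold1 p (cs ++ [c]) = pvStep1 p (pvFold1 p cs) c := by
  simp [pvFold1, List.foldl_append]

theorem pvFold1_snd (p : Char → Bool) (cs : List Char) (n : Nat) :
    n ≤ (pvFold1 p cs).2 ↔ ∃ l, l <:+ cs ∧ l.length = n ∧ ∀ c ∈ l, p c = true := by
  induction cs using List.reverseRecOn generalizing n with
  | nil =>
    simp only [pvFold1, List.foldl_nil]
    constructor
    · intro h
      have hn : n = 0 := Nat.le_zero.mp h
      exact ⟨[], List.suffix_rfl, by simp [hn], by simp⟩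
    · rintro ⟨l, hl, rfl, -⟩
      simp [List.suffix_nil.mp hl]
  | append_singleton cs c ih =>
    rw [pvFold1_append, pvStep1]
    by_cases hp : p c = true
    · rw [if_pos hp]
      constructor
      · intro hn
        match n with
        | 0 => exact ⟨[], List.nil_suffix, rfl, by simp⟩
        | m + 1 =>
          obtain ⟨l, hl, hlen, hall⟩ := (ih m).mp (by omega)
          refine ⟨l ++ [c], List.suffix_concat_iff.mpr (Or.inr ⟨l, rfl, hl⟩), by simp [hlen], ?_⟩
          intro x hx
          rcases List.mem_append.mp hx with h | h
          · exact hall x h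
          · simp only [List.mem_singleton] at h; subst h; exact hp
      · rintro ⟨l, hl, rfl, hall⟩
        rcases List.suffix_concat_iff.mp hl with rfl | ⟨t, rfl, ht⟩
        · simp
        · have := (ih t.length).mpr ⟨t, ht, rfl, fun x hx => hall x (List.mem_append.mpr (Or.inl hx))⟩
          simp only [List.length_append, List.length_singleton]
          omega
    · rw [if_neg hp]
      constructor
      · intro hn
        have : n = 0 := by omega
        subst this
        exact ⟨[], List.nil_suffix, rfl, by simp⟩
      · rintro ⟨l, hl, rfl, hall⟩
        rcases List.suffix_concat_iff.mp hl with rfl | ⟨t, rfl, ht⟩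
        · simp
        · exact absurd (hall c (by simp)) (by simp [hp])

theorem pvFold1_fst (p : Char → Bool) (cs : List Char) (n : Nat) :
    n ≤ (pvFold1 p cs).1 ↔ ∃ l, l <:+: cs ∧ l.length = n ∧ ∀ c ∈ l, p c = true := by
  induction cs using List.reverseRecOn generalizing n with
  | nil =>
    simp only [pvFold1, List.foldl_nil]
    constructor
    · intro h
      have hn : n = 0 := Nat.le_zero.mp h
      exact ⟨[], List.infix_rfl, by simp [hn], by simp⟩
    · rintro ⟨l, hl, rfl, -⟩
      simp [List.infix_nil.mp hl]
  | append_singleton cs c ih =>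
    have key : (pvFold1 p (cs ++ [c])).1 = max (pvFold1 p cs).1 (pvFold1 p (cs ++ [c])).2 := by
      rw [pvFold1_append, pvStep1]
      by_cases hp : p c = true
      · rw [if_pos hp]
      · rw [if_neg hp]; simp
    rw [key, le_max_iff, ih, pvFold1_snd]
    constructor
    · rintro (⟨l, hl, hlen, hall⟩ | ⟨l, hl, hlen, hall⟩)
      · exact ⟨l, List.infix_concat_iff.mpr (Or.inr hl), hlen, hall⟩
      · exact ⟨l, List.infix_concat_iff.mpr (Or.inl hl), hlen, hall⟩
    · rintro ⟨l, hl, hlen, hall⟩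
      rcases List.infix_concat_iff.mp hl with h | h
      · exact Or.inr ⟨l, h, hlen, hall⟩
      · exact Or.inl ⟨l, h, hlen, hall⟩

theorem pvWindow_iff (p : Char → Bool) (k : Nat) (hk : 0 < k) (cs : List Char) (b : Int)
    (hb : b = PySem.List.len cs - k + 1) :
    ((PySem.List.pyRange 0 b 1).any (fun i =>
        (PySem.List.slice cs (some i) (some (i + k))).all p)) = true
      ↔ ∃ l, l <:+: cs ∧ l.length = k ∧ ∀ c ∈ l, p c = true := by
  subst hb
  rw [List.any_eq_true]
  constructor
  · rintro ⟨i, hi, hpred⟩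
    obtain ⟨h0, hlt⟩ := PySem.List.mem_pyRange_one.mp hi
    rw [PySem.List.len_eq] at hlt
    have hlen : i.toNat + k ≤ cs.length := by omega
    have hsl : PySem.List.slice cs (some i) (some (i + k)) = (cs.drop i.toNat).take k := by
      rw [PySem.List.slice_toNat cs h0 (by omega)]
      congr 1
      omega
    rw [hsl, List.all_eq_true] at hpred
    refine ⟨(cs.drop i.toNat).take k, ?_, ?_, hpred⟩
    · exact (List.take_prefix _ _).isInfix.trans (List.drop_suffix _ _).isInfix
    · simp only [List.length_take, List.length_drop]
      omega
  · rintro ⟨l, ⟨s, t, hst⟩, hlen, hall⟩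
    refine ⟨(s.length : Int), ?_, ?_⟩
    · apply PySem.List.mem_pyRange_one.mpr
      have : cs.length = s.length + l.length + t.length := by
        rw [← hst]; simp [List.length_append]; omega
      rw [PySem.List.len_eq]
      constructor <;> [positivity; omega]
    · rw [PySem.List.slice_toNat cs (by positivity) (by positivity)]
      have h1 : ((s.length : Int) + k).toNat - (s.length : Int).toNat = k := by omega
      have h2 : ((s.length : Int)).toNat = s.length := by omega
      rw [h1, h2, ← hst]
      have : s ++ l ++ t = s ++ (l ++ t) := by simp
      rw [this, List.drop_left, List.take_left' hlen, List.all_eq_true]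
      exact hall

-- an 'if P or Q' Prop-guarded rejection equals B's chain of two Bool-guarded rejections
theorem pvIf_eq (P Q : Prop) [Decidable P] [Decidable Q] (a b : Bool)
    (hPa : P ↔ a = true) (hQb : Q ↔ b = true) :
    (if P ∨ Q then false else true) = (if a then false else if b then false else true) := by
  by_cases hP : P
  · rw [if_pos (Or.inl hP), if_pos (hPa.mp hP)]
  · by_cases hQ : Q
    · rw [if_pos (Or.inr hQ)]
      by_cases hA : a = true
      · rw [if_pos hA]
      · rw [if_neg hA, if_pos (hQb.mp hQ)]
    · rw [if_neg (by tauto), if_neg (fun h => hP (hPa.mpr h)), if_neg (fun h => hQ (hQb.mpr h))]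

-- the tail (letter-pattern) checks of A and of B agree on any character list
theorem pvTail_eq (text : List Char) :
    (if (text.foldl pvStepA (0, 0, 0, 0)).1 > 4 ∨ (text.foldl pvStepA (0, 0, 0, 0)).2.1 > 2
     then false else true)
      = (if (PySem.List.pyRange 0 (PySem.List.len text - 4) 1).any (fun i =>
            (PySem.List.slice text (some i) (some (i + 5))).all (fun c => !pvVowel c)) then false
         else if (PySem.List.pyRange 0 (PySem.List.len text - 2) 1).any (fun i =>
            (PySem.List.slice text (some i) (some (i + 3))).all pvVowel) then false
         else true) := by
  have hC : (text.foldl pvStepA (0, 0, 0, 0)).1 > 4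
      ↔ ((PySem.List.pyRange 0 (PySem.List.len text - 4) 1).any (fun i =>
          (PySem.List.slice text (some i) (some (i + 5))).all (fun c => !pvVowel c))) = true := by
    rw [pvStepA_split]
    show 4 < (pvFold1 (fun c => !pvVowel c) text).1 ↔ _
    rw [Nat.lt_iff_add_one_le]
    rw [pvFold1_fst (fun c => !pvVowel c) text 5]
    exact (pvWindow_iff (fun c => !pvVowel c) 5 (by norm_num) text _ (by push_cast; ring)).symm
  have hV : (text.foldl pvStepA (0, 0, 0, 0)).2.1 > 2
      ↔ ((PySem.List.pyRange 0 (PySem.List.len text - 2) 1).any (fun i =>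
          (PySem.List.slice text (some i) (some (i + 3))).all pvVowel)) = true := by
    rw [pvStepA_split]
    show 2 < (pvFold1 pvVowel text).1 ↔ _
    rw [Nat.lt_iff_add_one_le]
    rw [pvFold1_fst pvVowel text 3]
    exact (pvWindow_iff pvVowel 3 (by norm_num) text _ (by push_cast; ring)).symm
  exact pvIf_eq _ _ _ _ hC hV

-- ===== VERDICT (by name: the statement is the Claim_ definition above) =====
theorem is_good_branch_py_spec : Claim_equal_is_good_branch_py := by
  intro candidate _
  unfold Spec_is_good_branch_py is_good_branch_py is_good_branch_py_alt
  simp only [pvCheckWordsA_eq, Bool.not_not]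
  by_cases h1 : (candidate == "" || decide (PySem.Str.len candidate < 4)) = true
  · rw [if_pos h1, if_pos h1]
  · rw [if_neg h1, if_neg h1]
    by_cases h2 : (PySem.Str.split₀ candidate).length > 2
    · rw [if_pos h2, if_pos h2]
    · rw [if_neg h2, if_neg h2]
      by_cases h3 : ((PySem.Str.split₀ candidate).any fun w =>
          decide (PySem.Str.len w < 3) || pvNoise.contains (PySem.Str.lower w)) = true
      · rw [if_pos h3, if_pos h3]
      · rw [if_neg h3, if_neg h3]
        exact pvTail_eq _
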